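-- pv_equiv track=rewrite | github.com/jumaniclarke/djangoadmin | djangopostgresdemo/myapp/management/commands/marking.py | _format_chart_name
-- ===== SOURCE A (Python) =====
-- def _format_chart_name(chart_name):
--     """
--     Format chart type name for readable feedback.
--     Removes 'xl' prefix and adds spaces before capital letters.
--
--     Examples:
--         'xlPie' -> 'Pie'
--         'xlColumn' -> 'Column'
--         'xlCylinderColClustered' -> 'Cylinder Col Clustered'
--     """
--     if not chart_name:
--         return chart_name
--
--     # Remove 'xl' prefix if present
--     name = chart_name
--     if name.startswith('xl'):
--         name = name[2:]
--
--     # Add space before each capital letter (except the first one)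
--     formatted = ''
--     for i, char in enumerate(name):
--         if i > 0 and char.isupper():
--             formatted += ' '
--         formatted += char
--
--     return formatted
-- ===== SOURCE B (Python) =====
-- def _format_chart_name(chart_name):
--     if not chart_name:
--         return chart_name
--     # Remove 'xl' prefix if present
--     name = chart_name
--     if name.startswith('xl'):
--         name = name[2:]
--     # Two-pass: find the word boundaries (capitals after position 0), then slice and join
--     idxs = [i for i in range(1, len(name)) if name[i].isupper()]
--     bounds = [0] + idxs + [len(name)]
--     parts = [name[bounds[k]:bounds[k + 1]] for k in range(len(bounds) - 1)]
--     return ' '.join(parts)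
-- ===== Notes on version B (the rewrite author's own statement) =====
-- stated objective: alternative
-- what changed: A builds the result character-by-character in one accumulating scan with an index test; B first collects the word-boundary indices (capitals after position 0), slices the name into words at those boundaries, and joins the words with spaces.
import Mathlib
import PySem

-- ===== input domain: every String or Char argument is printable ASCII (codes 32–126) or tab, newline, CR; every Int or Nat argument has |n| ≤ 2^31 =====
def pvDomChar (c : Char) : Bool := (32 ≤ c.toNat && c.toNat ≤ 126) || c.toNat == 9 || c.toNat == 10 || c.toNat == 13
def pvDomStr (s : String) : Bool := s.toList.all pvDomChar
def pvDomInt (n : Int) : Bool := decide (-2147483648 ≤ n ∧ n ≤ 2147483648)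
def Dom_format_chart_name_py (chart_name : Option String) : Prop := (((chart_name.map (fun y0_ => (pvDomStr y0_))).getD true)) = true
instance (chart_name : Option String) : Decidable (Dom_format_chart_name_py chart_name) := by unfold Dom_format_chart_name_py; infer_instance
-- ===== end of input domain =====

-- B replaces A's single accumulating scan by a two-pass decomposition (collect word-boundary
-- indices, slice into words, join with spaces); objective: alternative (same cost, different structure).

-- ===== PORT A =====
-- literal transliteration of A: per-character loop appending to an accumulator
def format_chart_name_py (chart_name : Option String) : Option String :=
  match chart_name with
  | none => none
  | some s =>
    if s.toList = [] then some s           -- `if not chart_name: return chart_name`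
    else
      let name : List Char :=
        if PySem.Chars.startswith s.toList ['x', 'l'] then
          PySem.List.slice s.toList (some 2) none
        else s.toList
      let formatted : List Char :=
        (PySem.List.enumerate name 0).foldl
          (fun acc p =>
            (if decide (0 < p.1) && PySem.Chars.isupper p.2 then acc ++ [' '] else acc) ++ [p.2])
          []
      some (String.ofList formatted)

-- ===== PORT B =====
-- literal transliteration of B: boundary indices, then slices, then join
def format_chart_name_py_alt (chart_name : Option String) : Option String :=
  match chart_name with
  | none => none
  | some s =>
    if s.toList = [] then some s
    else
      let name : List Char :=
        if PySem.Chars.startswith s.toList ['x', 'l'] then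
          PySem.List.slice s.toList (some 2) none
        else s.toList
      let len : Int := name.length
      let idxs : List Int :=
        (PySem.List.pyRange 1 len 1).filter
          (fun i => PySem.Chars.isupper (PySem.List.pyGetD name i ' '))
      let bounds : List Int := 0 :: idxs ++ [len]
      let parts : List (List Char) :=
        (PySem.List.pyRange 0 ((bounds.length : Int) - 1) 1).map
          (fun k =>
            PySem.List.slice name (some (PySem.List.pyGetD bounds k 0))
              (some (PySem.List.pyGetD bounds (k + 1) 0)))
      some (String.ofList (PySem.Chars.join [' '] parts))

-- ===== PRECONDITION & SPEC =====
def Spec_format_chart_name_py (chart_name : Option String) (out : Option String) : Prop := out = format_chart_name_py_alt chart_name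
instance (chart_name : Option String) (out : Option String) : Decidable (Spec_format_chart_name_py chart_name out) := by unfold Spec_format_chart_name_py; infer_instance

-- ===== CLAIM (what is proved, stated in full; the proofs are below) =====
def Claim_equal_format_chart_name_py : Prop := ∀ (chart_name : Option String), Dom_format_chart_name_py chart_name → Spec_format_chart_name_py chart_name (format_chart_name_py chart_name)

-- ===== LEMMAS AND PROOFS =====

-- ' ' inserted before every uppercase character
def pvSpaced (l : List Char) : List Char :=
  l.flatMap (fun c => if PySem.Chars.isupper c then [' ', c] else [c])

-- ' ' inserted before every uppercase character except at position 0
def pvSpacedHead : List Char → List Char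
  | [] => []
  | c :: r => c :: pvSpaced r

theorem pvSpaced_nil : pvSpaced [] = [] := rfl

theorem pvSpaced_cons (c : Char) (r : List Char) :
    pvSpaced (c :: r) =
      (if PySem.Chars.isupper c then [' ', c] else [c]) ++ pvSpaced r := rfl

theorem pvDrop_cons (name : List Char) (a : Nat) (ha : a < name.length) :
    name.drop a = name.getD a ' ' :: name.drop (a + 1) := by
  rw [List.drop_eq_getElem_cons ha]
  congr 1
  simp [List.getD_eq_getElem?_getD, List.getElem?_eq_getElem ha]

-- A's loop over the tail (start index ≥ 1) appends pvSpaced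
theorem pvFoldA (l : List Char) (s : Int) (hs : 1 ≤ s) (acc : List Char) :
    (PySem.List.enumerate l s).foldl
        (fun acc p =>
          (if decide (0 < p.1) && PySem.Chars.isupper p.2 then acc ++ [' '] else acc) ++ [p.2])
        acc = acc ++ pvSpaced l := by
  induction l generalizing s acc with
  | nil => simp [PySem.List.enumerate_nil, pvSpaced_nil]
  | cons c r ih =>
    rw [PySem.List.enumerate_cons, List.foldl_cons, ih (s + 1) (by omega)]
    have h0 : decide (0 < s) = true := by simp; omega
    rw [pvSpaced_cons, h0]
    by_cases hu : PySem.Chars.isupper c <;> simp [hu]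

-- A's whole loop computes pvSpacedHead
theorem pvA_loop (name : List Char) :
    (PySem.List.enumerate name 0).foldl
        (fun acc p =>
          (if decide (0 < p.1) && PySem.Chars.isupper p.2 then acc ++ [' '] else acc) ++ [p.2])
        [] = pvSpacedHead name := by
  cases name with
  | nil => simp [PySem.List.enumerate_nil, pvSpacedHead]
  | cons c r =>
    rw [PySem.List.enumerate_cons, List.foldl_cons]
    simp only [zero_add]
    rw [pvFoldA r 1 le_rfl]
    simp [pvSpacedHead]

-- map over consecutive index pairs = structural pairs map
def pvPairsMap (f : Nat → Nat → List Char) : List Nat → List (List Char)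
  | [] => []
  | [_] => []
  | a :: b :: t => f a b :: pvPairsMap f (b :: t)

theorem pvPairsMap_cons₂ (f : Nat → Nat → List Char) (a b : Nat) (t : List Nat) :
    pvPairsMap f (a :: b :: t) = f a b :: pvPairsMap f (b :: t) := rfl

theorem pvMapRangePairs (f : Nat → Nat → List Char) (l : List Nat) :
    (List.range (l.length - 1)).map (fun k => f (l.getD k 0) (l.getD (k + 1) 0)) =
      pvPairsMap f l := by
  induction l with
  | nil => rfl
  | cons a t ih =>
    cases t with
    | nil => rfl
    | cons b u =>
      rw [pvPairsMap_cons₂, ← ih]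
      have hlen : (a :: b :: u).length - 1 = ((b :: u).length - 1) + 1 := by simp
      rw [hlen, List.range_succ_eq_map]
      simp only [List.map_cons, List.map_map]
      congr 1

-- B's join over the slices, structurally
def pvJoinCuts (name : List Char) (a : Nat) : List Nat → List Char
  | [] => name.drop a
  | p :: ps => (name.drop a).take (p - a) ++ ' ' :: pvJoinCuts name p ps

theorem pvJoinCuts_nil (name : List Char) (a : Nat) :
    pvJoinCuts name a [] = name.drop a := rfl

theorem pvJoinCuts_cons (name : List Char) (a p : Nat) (ps : List Nat) :
    pvJoinCuts name a (p :: ps) = (name.drop a).take (p - a) ++ ' ' :: pvJoinCuts name p ps := rfl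

theorem pvJoin_pairsMap (name : List Char) (a : Nat) (ps : List Nat) :
    PySem.Chars.join [' ']
        (pvPairsMap (fun i j => (name.drop i).take (j - i)) (a :: ps ++ [name.length])) =
      pvJoinCuts name a ps := by
  induction ps generalizing a with
  | nil =>
    simp only [List.cons_append, List.nil_append]
    show PySem.Chars.join [' '] [(name.drop a).take (name.length - a)] = _
    rw [PySem.Chars.join_singleton, pvJoinCuts_nil]
    rw [show name.length - a = (name.drop a).length by rw [List.length_drop], List.take_length]
  | cons p t ih =>
    simp only [List.cons_append]
    rw [pvPairsMap_cons₂]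
    have hip := ih p
    simp only [List.cons_append] at hip
    rcases ht : pvPairsMap (fun i j => (name.drop i).take (j - i)) (p :: (t ++ [name.length]))
      with _ | ⟨q, u⟩
    · exfalso
      cases t <;> simp [pvPairsMap] at ht
    · rw [PySem.Chars.join_cons_cons, ← ht, hip, pvJoinCuts_cons]
      simp

theorem pvJoinCuts_shift (name : List Char) (a : Nat) (ps : List Nat)
    (ha : a < name.length) (hgt : ∀ p ∈ ps, a < p) :
    pvJoinCuts name a ps = name.getD a ' ' :: pvJoinCuts name (a + 1) ps := by
  cases ps with
  | nil => rw [pvJoinCuts_nil, pvJoinCuts_nil, pvDrop_cons name a ha]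
  | cons p t =>
    have hap : a < p := hgt p (by simp)
    rw [pvJoinCuts_cons, pvJoinCuts_cons, pvDrop_cons name a ha]
    have hsub : p - a = (p - (a + 1)) + 1 := by omega
    rw [hsub, List.take_succ_cons]
    simp

-- the boundary indices B computes, in Nat form, starting after position a
def pvIdxsFrom (name : List Char) (a : Nat) : List Nat :=
  (List.range' (a + 1) (name.length - (a + 1))).filter
    (fun i => PySem.Chars.isupper (name.getD i ' '))

theorem pvMem_idxsFrom {name : List Char} {a p : Nat} (h : p ∈ pvIdxsFrom name a) :
    a < p ∧ p < name.length ∧ PySem.Chars.isupper (name.getD p ' ') = true := by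
  unfold pvIdxsFrom at h
  rw [List.mem_filter, List.mem_range'] at h
  obtain ⟨⟨i, hi, rfl⟩, hu⟩ := h
  exact ⟨by omega, by omega, hu⟩

-- the heart: joining B's slices at the uppercase boundaries = spacedHead of the suffix
theorem pvJoinCuts_idxs (n : Nat) : ∀ (name : List Char) (a : Nat),
    a < name.length → name.length = a + 1 + n →
    pvJoinCuts name a (pvIdxsFrom name a) = pvSpacedHead (name.drop a) := by
  induction n with
  | zero =>
    intro name a ha hlen
    have hidx : pvIdxsFrom name a = [] := by
      unfold pvIdxsFrom
      have h0 : name.length - (a + 1) = 0 := by omega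
      simp [h0]
    rw [hidx, pvJoinCuts_nil]
    rw [pvDrop_cons name a ha, List.drop_eq_nil_of_le (by omega)]
    rfl
  | succ m ih =>
    intro name a ha hlen
    have ha1 : a + 1 < name.length := by omega
    have hdrop : name.drop a = name.getD a ' ' :: name.drop (a + 1) := pvDrop_cons name a ha
    have hdrop1 : name.drop (a + 1) = name.getD (a + 1) ' ' :: name.drop (a + 2) :=
      pvDrop_cons name (a + 1) ha1
    have hrange : pvIdxsFrom name a =
        (if PySem.Chars.isupper (name.getD (a + 1) ' ') then [a + 1] else []) ++
          pvIdxsFrom name (a + 1) := by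
      unfold pvIdxsFrom
      have h1 : name.length - (a + 1) = (name.length - (a + 2)) + 1 := by omega
      rw [h1, List.range'_succ, List.filter_cons]
      have h2 : a + 1 + 1 = a + 2 := rfl
      rw [h2]
      split_ifs <;> simp
    by_cases hu : PySem.Chars.isupper (name.getD (a + 1) ' ') = true
    · rw [hrange, if_pos hu, List.singleton_append, pvJoinCuts_cons]
      rw [ih name (a + 1) ha1 (by omega)]
      have htake : (name.drop a).take (a + 1 - a) = [name.getD a ' '] := by
        rw [hdrop]; simp
      rw [htake, hdrop, hdrop1]
      show _ = name.getD a ' ' :: pvSpaced (name.getD (a + 1) ' ' :: name.drop (a + 2))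
      rw [pvSpaced_cons, if_pos hu]
      rfl
    · have hu' : PySem.Chars.isupper (name.getD (a + 1) ' ') = false := by simpa using hu
      rw [hrange, if_neg (by rw [hu']; simp), List.nil_append]
      rw [pvJoinCuts_shift name a _ ha (fun p hp => by
        have := pvMem_idxsFrom hp; omega)]
      rw [ih name (a + 1) ha1 (by omega)]
      rw [hdrop, hdrop1]
      show _ = name.getD a ' ' :: pvSpaced (name.getD (a + 1) ' ' :: name.drop (a + 2))
      rw [pvSpaced_cons, if_neg (by rw [hu']; simp)]
      rfl

-- pyRange over natural bounds with step 1 is a mapped range'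
theorem pvPyRange_natCast (n : Nat) : ∀ a b : Nat, b - a = n →
    PySem.List.pyRange (a : Int) (b : Int) 1 = (List.range' a n).map (fun k : Nat => (k : Int)) := by
  induction n with
  | zero =>
    intro a b h
    simp only [List.range'_zero, List.map_nil]
    simp [PySem.List.pyRange]
    omega
  | succ m ih =>
    intro a b h
    rw [PySem.List.pyRange_one_cons (by exact_mod_cast (by omega : a < b))]
    have h1 : ((a : Int) + 1) = ((a + 1 : Nat) : Int) := by push_cast; ring
    rw [h1, ih (a + 1) b (by omega), List.range'_succ]
    simp

-- filtering a casted list = casting the filtered list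
theorem pvFilterMapCast (l : List Nat) (p : Int → Bool) (q : Nat → Bool)
    (h : ∀ i ∈ l, p (i : Int) = q i) :
    (l.map (fun k : Nat => (k : Int))).filter p = (l.filter q).map (fun k : Nat => (k : Int)) := by
  induction l with
  | nil => rfl
  | cons a t ih =>
    rw [List.map_cons, List.filter_cons, List.filter_cons, h a (by simp),
      ih (fun i hi => h i (by simp [hi]))]
    split_ifs <;> simp

-- B's Int-level index list equals the Nat-level one
theorem pvIdxs_int (name : List Char) :
    (PySem.List.pyRange 1 (name.length : Int) 1).filter
        (fun i => PySem.Chars.isupper (PySem.List.pyGetD name i ' ')) =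
      (pvIdxsFrom name 0).map (fun k : Nat => (k : Int)) := by
  have hr := pvPyRange_natCast (name.length - 1) 1 name.length rfl
  have h1 : ((1 : Nat) : Int) = (1 : Int) := rfl
  rw [h1] at hr
  rw [hr, pvFilterMapCast _ _ (fun i => PySem.Chars.isupper (name.getD i ' '))
      (fun i _ => by rw [PySem.List.pyGetD_natCast])]
  unfold pvIdxsFrom
  norm_num

theorem pvBounds_getD (nb : List Nat) (k : Nat) :
    PySem.List.pyGetD (nb.map (fun j : Nat => (j : Int))) (k : Int) 0 = ((nb.getD k 0 : Nat) : Int) := by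
  have h := PySem.List.pyGetD_map (fun j : Nat => (j : Int)) nb (k : Int) 0
  simp only [Nat.cast_zero] at h
  rw [h, PySem.List.pyGetD_natCast]

-- B's core computation equals pvSpacedHead
theorem pvB_core (name : List Char) (hne : name ≠ []) :
    PySem.Chars.join [' ']
        ((PySem.List.pyRange 0
            ((((0 : Int) :: ((PySem.List.pyRange 1 (name.length : Int) 1).filter
                (fun i => PySem.Chars.isupper (PySem.List.pyGetD name i ' '))) ++
                  [(name.length : Int)]).length : Int) - 1) 1).map
          (fun k =>
            PySem.List.slice name
              (some (PySem.List.pyGetD ((0 : Int) :: ((PySem.List.pyRange 1 (name.length : Int) 1).filter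
                  (fun i => PySem.Chars.isupper (PySem.List.pyGetD name i ' '))) ++
                    [(name.length : Int)]) k 0))
              (some (PySem.List.pyGetD ((0 : Int) :: ((PySem.List.pyRange 1 (name.length : Int) 1).filter
                  (fun i => PySem.Chars.isupper (PySem.List.pyGetD name i ' '))) ++
                    [(name.length : Int)]) (k + 1) 0)))) =
      pvSpacedHead name := by
  have hL : 0 < name.length := List.length_pos_iff.mpr hne
  set nb : List Nat := 0 :: pvIdxsFrom name 0 ++ [name.length] with hnb
  have hmap : ((0 : Int) :: ((PySem.List.pyRange 1 (name.length : Int) 1).filter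
      (fun i => PySem.Chars.isupper (PySem.List.pyGetD name i ' '))) ++ [(name.length : Int)]) =
      nb.map (fun j : Nat => (j : Int)) := by
    rw [pvIdxs_int, hnb]
    simp
  rw [hmap]
  have hlen : ((nb.map (fun j : Nat => (j : Int))).length : Int) - 1 = ((nb.length - 1 : Nat) : Int) := by
    have h1 : 1 ≤ nb.length := by simp [hnb]
    simp only [List.length_map]
    omega
  rw [hlen, PySem.List.pyRange_zero_natCast, List.map_map]
  have hfun : ∀ k ∈ List.range (nb.length - 1),
      ((fun k : Int =>
        PySem.List.slice name (some (PySem.List.pyGetD (nb.map (fun j : Nat => (j : Int))) k 0))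
          (some (PySem.List.pyGetD (nb.map (fun j : Nat => (j : Int))) (k + 1) 0))) ∘ (fun k : Nat => (k : Int))) k =
      (fun i j => (name.drop i).take (j - i)) (nb.getD k 0) (nb.getD (k + 1) 0) := by
    intro k _
    simp only [Function.comp_apply]
    have h1 : ((k : Int) + 1) = ((k + 1 : Nat) : Int) := by push_cast; ring
    rw [h1, pvBounds_getD, pvBounds_getD, PySem.List.slice_natCast]
  rw [List.map_congr_left hfun,
    pvMapRangePairs (fun i j => (name.drop i).take (j - i)) nb, hnb,
    pvJoin_pairsMap name 0 (pvIdxsFrom name 0)]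
  cases hn : name.length with
  | zero => omega
  | succ m =>
    have h := pvJoinCuts_idxs m name 0 (by omega) (by omega)
    simpa using h

-- ===== VERDICT (by name: the statement is the Claim_ definition above) =====
theorem format_chart_name_py_spec : Claim_equal_format_chart_name_py := by
  intro chart_name _
  unfold Spec_format_chart_name_py format_chart_name_py format_chart_name_py_alt
  cases chart_name with
  | none => rfl
  | some s =>
    by_cases hnil : s.toList = []
    · simp [hnil]
    · simp only [if_neg hnil]
      set name : List Char :=
        if PySem.Chars.startswith s.toList ['x', 'l'] then
          PySem.List.slice s.toList (some 2) none
        else s.toList with hname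
      by_cases hne : name = []
      · rw [hne]
        simp [PySem.List.enumerate_nil]
        decide
      · rw [pvA_loop name, pvB_core name hne]
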